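-- pv_equiv track=rewrite | github.com/pypi-data/pypi-mirror-403 | packages/membrowse/membrowse-1.0.9-py3-none-any.whl/membrowse/utils/github_comment.py | _group_sections_by_region
-- ===== SOURCE A (Python) =====
-- def _group_sections_by_region(sections_data: dict) -> dict[str, list[dict]]:
--     """
--     Group modified sections by their region name.
--
--     Args:
--         sections_data: Dict with 'modified' list of section dicts
--
--     Returns:
--         Dict mapping region name to list of modified sections
--     """
--     sections_by_region: dict[str, list[dict]] = {}
--     modified_sections = sections_data.get('modified', [])
--
--     for section in modified_sections:
--         region_name = section.get('region', 'Unknown')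
--         if region_name not in sections_by_region:
--             sections_by_region[region_name] = []
--         sections_by_region[region_name].append(section)
--
--     return sections_by_region
-- ===== SOURCE B (Python) =====
-- def _group_sections_by_region(sections_data: dict) -> dict[str, list[dict]]:
--     modified = sections_data.get('modified', [])
--     keys = [s.get('region', 'Unknown') for s in modified]
--     return {r: [s for s, k in zip(modified, keys) if k == r]
--             for r in dict.fromkeys(keys)}
-- ===== Notes on version B (the rewrite author's own statement) =====
-- stated objective: alternative
-- what changed: Instead of incrementally building the dict with a seen-region check and per-section append, B precomputes each section's region key, deduplicates the keys once (dict.fromkeys), and builds the result as one dict comprehension that filters the sections per region.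
import Mathlib
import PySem

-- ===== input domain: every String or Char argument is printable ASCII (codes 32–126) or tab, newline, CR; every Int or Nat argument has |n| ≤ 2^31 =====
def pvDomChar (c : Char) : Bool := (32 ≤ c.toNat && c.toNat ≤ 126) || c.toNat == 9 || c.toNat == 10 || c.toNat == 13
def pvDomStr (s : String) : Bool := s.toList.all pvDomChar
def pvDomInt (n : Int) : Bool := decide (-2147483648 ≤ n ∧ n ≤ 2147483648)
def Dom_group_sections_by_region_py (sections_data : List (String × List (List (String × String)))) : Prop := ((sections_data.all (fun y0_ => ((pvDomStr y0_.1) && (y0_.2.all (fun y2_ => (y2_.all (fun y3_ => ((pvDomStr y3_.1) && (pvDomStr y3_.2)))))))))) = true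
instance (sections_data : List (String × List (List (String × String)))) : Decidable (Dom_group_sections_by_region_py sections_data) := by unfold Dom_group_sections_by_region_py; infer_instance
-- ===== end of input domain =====

-- B replaces A's incremental seen-region dict building by a dedup-keys-then-filter dict comprehension (alternative decomposition, same results).

-- ===== PORT A =====
-- section.get('region', 'Unknown')
def pvRegionOf (s : List (String × String)) : String :=
  (PySem.Dict.mk s).getD "region" "Unknown"

-- literal port of A's loop: check membership, insert [] if absent, then append
def group_sections_by_region_py (sections_data : List (String × List (List (String × String)))) : List (String × List (List (String × String))) :=
  let modified_sections := (PySem.Dict.mk sections_data).getD "modified" []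
  let sections_by_region :=
    modified_sections.foldl (fun d sec =>
      let region_name := pvRegionOf sec
      let d := if d.contains region_name = false then d.insert region_name [] else d
      d.modify region_name [] (· ++ [sec]))
      PySem.Dict.empty
  sections_by_region.items

-- ===== PORT B =====
def group_sections_by_region_py_alt (sections_data : List (String × List (List (String × String)))) : List (String × List (List (String × String))) :=
  let modified := (PySem.Dict.mk sections_data).getD "modified" []
  let keys := modified.map (fun s => (PySem.Dict.mk s).getD "region" "Unknown")
  (PySem.List.dedup keys).map (fun r =>
    (r, ((modified.zip keys).filter (fun p => p.2 == r)).map (·.1)))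

-- ===== PRECONDITION & SPEC =====
def Spec_group_sections_by_region_py (sections_data : List (String × List (List (String × String)))) (out : List (String × List (List (String × String)))) : Prop := out = group_sections_by_region_py_alt sections_data
instance (sections_data : List (String × List (List (String × String)))) (out : List (String × List (List (String × String)))) : Decidable (Spec_group_sections_by_region_py sections_data out) := by unfold Spec_group_sections_by_region_py; infer_instance

-- ===== CLAIM (what is proved, stated in full; the proofs are below) =====
def Claim_equal_group_sections_by_region_py : Prop := ∀ (sections_data : List (String × List (List (String × String)))), Dom_group_sections_by_region_py sections_data → Spec_group_sections_by_region_py sections_data (group_sections_by_region_py sections_data)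

-- ===== LEMMAS AND PROOFS =====

-- A's loop body equals a single Dict.modify
theorem pvStep_eq_modify (d : PySem.Dict String (List (List (String × String)))) (s : List (String × String)) :
    (let r := pvRegionOf s
     let d' := if d.contains r = false then d.insert r [] else d
     d'.modify r [] (· ++ [s])) = d.modify (pvRegionOf s) [] (· ++ [s]) := by
  by_cases hc : d.contains (pvRegionOf s) = false
  · simp only [hc, if_true]
    simp [PySem.Dict.modify, PySem.Dict.getD_insert_self, PySem.Dict.insert_insert_self,
          PySem.Dict.getD_of_not_contains d ([] : List (List (String × String))) hc]
  · simp [hc]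

theorem pv_filter_zip (modified : List (List (String × String))) (r : String) :
    ((modified.zip (modified.map pvRegionOf)).filter (fun p => p.2 == r)).map (·.1)
      = (modified.filter (fun s => pvRegionOf s == r)) := by
  induction modified with
  | nil => rfl
  | cons h t ih =>
      simp only [List.map_cons, List.zip_cons_cons, List.filter_cons]
      by_cases hr : pvRegionOf h == r
      · simp [hr, ih]
      · simp [hr, ih]

-- ===== VERDICT (by name: the statement is the Claim_ definition above) =====
theorem group_sections_by_region_py_spec : Claim_equal_group_sections_by_region_py := by
  intro sd _
  unfold Spec_group_sections_by_region_py group_sections_by_region_py group_sections_by_region_py_alt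
  simp only []
  set modified := (PySem.Dict.mk sd).getD "modified" [] with hm
  have hstep : (fun (d : PySem.Dict String (List (List (String × String)))) (sec : List (String × String)) =>
      let region_name := pvRegionOf sec
      let d' := if d.contains region_name = false then d.insert region_name [] else d
      d'.modify region_name [] (· ++ [sec]))
      = fun d sec => d.modify (pvRegionOf sec) [] (· ++ [sec]) := by
    funext d sec; exact pvStep_eq_modify d sec
  rw [hstep]
  have hpairs : modified.foldl (fun d sec => d.modify (pvRegionOf sec) [] (· ++ [sec])) PySem.Dict.empty
      = (modified.map (fun s => (pvRegionOf s, s))).foldl (fun d p => d.modify p.1 [] (· ++ [p.2])) PySem.Dict.empty := by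
    rw [List.foldl_map]
  rw [hpairs]
  set D := (modified.map (fun s => (pvRegionOf s, s))).foldl (fun d p => d.modify p.1 [] (· ++ [p.2])) PySem.Dict.empty with hD
  have hnodup : D.keys.Nodup := by
    rw [hD]
    exact PySem.Dict.nodup_keys_foldl_modify_key (modified.map (fun s => (pvRegionOf s, s)))
      (fun p => p.1) [] (fun _ p => (· ++ [p.2])) PySem.Dict.empty PySem.Dict.nodup_keys_empty
  have hkeys : D.keys = PySem.List.dedup (modified.map pvRegionOf) := by
    rw [hD, PySem.Dict.keys_foldl_modify_key]
    simp [PySem.Dict.keys_empty, PySem.Set.update_nil_left, List.map_map, Function.comp_def]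
  have hval : ∀ r, D.getD r [] = (modified.filter (fun s => pvRegionOf s == r)) := by
    intro r
    rw [hD, PySem.Dict.getD_foldl_modify_append]
    simp [PySem.Dict.getD_empty, List.filter_map, Function.comp_def, List.map_map]
  rw [PySem.Dict.items_eq_map_keys D hnodup [], hkeys]
  have hkfun : (fun s => (PySem.Dict.mk s).getD "region" "Unknown") = pvRegionOf := rfl
  rw [hkfun]
  apply List.map_congr_left
  intro r _
  rw [hval r, pv_filter_zip]
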